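-- pv_equiv track=rewrite | github.com/Shivam-baghel/Python_Scaler | 2. Data Structures and Algorithm/1. Intermediate/12. Hashing-1/Homework/K Occurrences.py | getSumOfKOccurences
-- ===== SOURCE A (Python) =====
-- def getSumOfKOccurences(B, C):
--     #first create a frequency map
--     freq = {}
--     for i in range(len(C)):
--         if C[i] in freq:
--             freq[C[i]] +=1
--         else:
--             freq[C[i]] =1
--
--     # sum of keys whose value is equal to B
--     count = 0
--     # for key,value in freq.items():
--     #     if value == B:
--     #         count +=key
--     for key in freq:
--         if freq[key]==B:
--             count +=key
--     return count
-- ===== SOURCE B (Python) =====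
-- def getSumOfKOccurences(B, C):
--     # Sort a copy and walk runs of equal values; add a run's value when its length is B.
--     total = 0
--     s = sorted(C)
--     i = 0
--     n = len(s)
--     while i < n:
--         j = i + 1
--         while j < n and s[j] == s[i]:
--             j += 1
--         if j - i == B:
--             total += s[i]
--         i = j
--     return total
-- ===== Notes on version B (the rewrite author's own statement) =====
-- stated objective: alternative
-- what changed: Replaces the hash-map frequency count plus second pass over the keys by sorting a copy of C and summing values of consecutive equal runs whose length is B in a single scan.
import Mathlib
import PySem

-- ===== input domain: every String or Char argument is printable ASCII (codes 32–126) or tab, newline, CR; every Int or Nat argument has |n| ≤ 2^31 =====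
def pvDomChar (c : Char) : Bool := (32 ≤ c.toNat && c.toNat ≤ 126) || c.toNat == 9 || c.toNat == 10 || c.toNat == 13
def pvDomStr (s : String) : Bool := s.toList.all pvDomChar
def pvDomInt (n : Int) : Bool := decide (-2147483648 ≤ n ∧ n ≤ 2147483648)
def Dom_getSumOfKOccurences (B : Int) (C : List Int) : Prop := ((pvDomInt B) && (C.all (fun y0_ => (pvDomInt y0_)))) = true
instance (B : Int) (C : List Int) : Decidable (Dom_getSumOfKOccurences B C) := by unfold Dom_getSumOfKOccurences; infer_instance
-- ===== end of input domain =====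

-- B replaces A's hash-map frequency count + key pass by a single scan over runs of a sorted copy of C (alternative decomposition, same results).


-- ===== PORT A =====
def getSumOfKOccurences (B : Int) (C : List Int) : Int :=
  let freq := (PySem.List.pyRange 0 (PySem.List.len C)).foldl
    (fun d i =>
      if d.contains (PySem.List.pyGetD C i 0) then
        d.insert (PySem.List.pyGetD C i 0) (d.getD (PySem.List.pyGetD C i 0) 0 + 1)
      else
        d.insert (PySem.List.pyGetD C i 0) 1)
    PySem.Dict.empty
  freq.keys.foldl (fun count key => if freq.getD key 0 = B then count + key else count) 0

-- ===== PORT B =====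
-- the outer while loop of Source B: each step consumes one run of equal values
-- (takeWhile/dropWhile give the run s[i..j) found by the inner while loop)
def scanRunsAux (B : Int) (acc : Int) : List Int → Int
  | [] => acc
  | x :: xs =>
      scanRunsAux B
        (if ((1 + ((xs.takeWhile (fun y => y == x)).length : Int)) = B) then acc + x else acc)
        (xs.dropWhile (fun y => y == x))
  termination_by s => s.length
  decreasing_by
    simpa using Nat.lt_succ_of_le ((List.dropWhile_sublist _).length_le)

def getSumOfKOccurences_alt (B : Int) (C : List Int) : Int :=
  scanRunsAux B 0 (PySem.List.sorted C (fun x => x) false)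

-- ===== PRECONDITION & SPEC =====
def Spec_getSumOfKOccurences (B : Int) (C : List Int) (out : Int) : Prop := out = getSumOfKOccurences_alt B C
instance (B : Int) (C : List Int) (out : Int) : Decidable (Spec_getSumOfKOccurences B C out) := by unfold Spec_getSumOfKOccurences; infer_instance

-- ===== CLAIM (what is proved, stated in full; the proofs are below) =====
def Claim_equal_getSumOfKOccurences : Prop := ∀ (B : Int) (C : List Int), Dom_getSumOfKOccurences B C → Spec_getSumOfKOccurences B C (getSumOfKOccurences B C)

-- ===== LEMMAS AND PROOFS =====

-- canonical value both ports compute: sum over the distinct elements of C of those occurring exactly B times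
def kSum (B : Int) (C : List Int) : Int :=
  ∑ k ∈ C.toFinset, (if (C.count k : Int) = B then k else 0)

theorem getD_not_contains (d : PySem.Dict Int Int) (x : Int) (h : d.contains x = false) :
    d.getD x 0 = 0 := by
  have hfind : d.items.find? (fun p => p.1 == x) = none := by
    rw [List.find?_eq_none]
    intro p hp
    simp only [PySem.Dict.contains, List.any_eq_false] at h
    exact h p hp
  simp [PySem.Dict.getD, PySem.Dict.get?, hfind]

-- A's frequency loop builds Counter(C)
theorem freq_eq_counter (C : List Int) :
    (PySem.List.pyRange 0 (PySem.List.len C)).foldl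
      (fun d i =>
        if d.contains (PySem.List.pyGetD C i 0) then
          d.insert (PySem.List.pyGetD C i 0) (d.getD (PySem.List.pyGetD C i 0) 0 + 1)
        else
          d.insert (PySem.List.pyGetD C i 0) 1)
      PySem.Dict.empty = PySem.Dict.counter C := by
  have h1 := PySem.List.foldl_pyRange_pyGetD C 0
      (fun (d : PySem.Dict Int Int) (x : Int) =>
        if d.contains x then d.insert x (d.getD x 0 + 1) else d.insert x 1)
      PySem.Dict.empty (le_refl 0)
  simp only [Int.toNat_zero, List.drop_zero] at h1
  refine Eq.trans h1 ?_
  rw [← PySem.Dict.foldl_insert_getD_add_one_eq_counter]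
  congr 1
  funext d x
  by_cases h : d.contains x
  · simp [h]
  · simp [h, getD_not_contains d x (by simpa using h)]

-- folding "if p k then acc + k else acc" is acc plus a sum
theorem foldl_if_add (p : Int → Prop) [DecidablePred p] (l : List Int) (acc : Int) :
    l.foldl (fun a k => if p k then a + k else a) acc
      = acc + (l.map (fun k => if p k then k else 0)).sum := by
  induction l generalizing acc with
  | nil => simp
  | cons x xs ih => simp only [List.foldl_cons, List.map_cons, List.sum_cons, ih]; split <;> ring

theorem toFinset_ofList (l : List Int) : (PySem.Set.ofList l : List Int).toFinset = l.toFinset := by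
  ext k; simp [List.mem_toFinset, PySem.Set.mem_ofList]

theorem portA_eq_kSum (B : Int) (C : List Int) : getSumOfKOccurences B C = kSum B C := by
  simp only [getSumOfKOccurences]
  rw [freq_eq_counter]
  simp only [PySem.Dict.keys_counter, PySem.Dict.getD_counter]
  rw [foldl_if_add (fun k => ((C.count k : Int) = B))]
  rw [← List.sum_toFinset _ (PySem.Set.nodup_ofList C)]
  rw [toFinset_ofList]
  simp [kSum]

theorem kSum_perm (B : Int) {s t : List Int} (h : s.Perm t) : kSum B s = kSum B t := by
  unfold kSum
  have ht : s.toFinset = t.toFinset := by ext k; simp [List.mem_toFinset, h.mem_iff]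
  rw [ht]
  exact Finset.sum_congr rfl (fun k _ => by rw [h.count_eq])

theorem not_mem_dropWhile_eq (x : Int) (xs : List Int)
    (hxs : ∀ y ∈ xs, x ≤ y) (hpw : xs.Pairwise (fun a b => a ≤ b)) :
    x ∉ xs.dropWhile (fun y => y == x) := by
  cases hD : xs.dropWhile (fun y => y == x) with
  | nil => simp
  | cons h0 t =>
    have hne : xs.dropWhile (fun y => y == x) ≠ [] := by simp [hD]
    have hhead := List.head_dropWhile_not (fun y => (y == x)) hne
    have hh0x : h0 ≠ x := by
      intro h; apply absurd hhead; simp [hD, h]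
    have hsub : (xs.dropWhile (fun y => y == x)).Sublist xs := List.dropWhile_sublist _
    have hh0mem : h0 ∈ xs := hsub.subset (by simp [hD])
    have hxh0 : x < h0 := lt_of_le_of_ne (hxs _ hh0mem) (fun h => hh0x h.symm)
    have hpwD : (h0 :: t).Pairwise (fun a b => a ≤ b) := hD ▸ List.Pairwise.sublist hsub hpw
    intro hx
    rcases List.mem_cons.mp hx with h | h
    · subst h; exact absurd hxh0 (lt_irrefl x)
    · exact absurd hxh0 (not_lt.mpr ((List.pairwise_cons.mp hpwD).1 x h))

theorem scan_sorted_aux (B : Int) : ∀ (n : Nat) (s : List Int), s.length ≤ n →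
    s.Pairwise (fun a b => a ≤ b) → ∀ acc, scanRunsAux B acc s = acc + kSum B s := by
  intro n
  induction n with
  | zero =>
    intro s hlen _ acc
    have hs : s = [] := List.eq_nil_of_length_eq_zero (Nat.le_zero.mp hlen)
    subst hs; simp [scanRunsAux, kSum]
  | succ n ih =>
    intro s hlen hs acc
    match s with
    | [] => simp [scanRunsAux, kSum]
    | x :: xs =>
      rw [scanRunsAux]
      have hsplit : xs.takeWhile (fun y => y == x) ++ xs.dropWhile (fun y => y == x) = xs :=
        List.takeWhile_append_dropWhile
      have hrun : ∀ y ∈ xs.takeWhile (fun y => y == x), y = x := by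
        intro y hy
        simpa using List.mem_takeWhile_imp hy
      have hxs_le : ∀ y ∈ xs, x ≤ y := (List.pairwise_cons.mp hs).1
      have hpw_xs : xs.Pairwise (fun a b => a ≤ b) := (List.pairwise_cons.mp hs).2
      have hxrest : x ∉ xs.dropWhile (fun y => y == x) := not_mem_dropWhile_eq x xs hxs_le hpw_xs
      have hrest_pw : (xs.dropWhile (fun y => y == x)).Pairwise (fun a b => a ≤ b) :=
        List.Pairwise.sublist (List.dropWhile_sublist _) hpw_xs
      have hrest_len : (xs.dropWhile (fun y => y == x)).length ≤ n :=
        le_trans (List.dropWhile_sublist _).length_le (Nat.le_of_succ_le_succ hlen)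
      -- counts in s
      have hcount_x : (x :: xs).count x = (xs.takeWhile (fun y => y == x)).length + 1 := by
        conv_lhs => rw [← hsplit]
        rw [List.count_cons_self, List.count_append]
        rw [List.count_eq_length.mpr (fun b hb => (hrun b hb).symm)]
        rw [List.count_eq_zero.mpr hxrest]
      have hcount_ne : ∀ k, k ≠ x → (x :: xs).count k = (xs.dropWhile (fun y => y == x)).count k := by
        intro k hk
        have h1 : List.count k (x :: xs) = List.count k xs := by simp [Ne.symm hk]
        rw [h1]
        conv_lhs => rw [← hsplit]
        rw [List.count_append, List.count_eq_zero.mpr (fun hkm => hk (hrun k hkm)), Nat.zero_add]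
      -- distinct elements of s
      have hxs_fins : xs.toFinset
          = (xs.takeWhile (fun y => y == x)).toFinset ∪ (xs.dropWhile (fun y => y == x)).toFinset := by
        conv_lhs => rw [← hsplit]
        exact List.toFinset_append
      have hfins : (x :: xs).toFinset = insert x (xs.dropWhile (fun y => y == x)).toFinset := by
        rw [List.toFinset_cons, hxs_fins]
        ext k
        simp only [Finset.mem_insert, Finset.mem_union, List.mem_toFinset]
        constructor
        · rintro (h | h | h)
          · exact Or.inl h
          · exact Or.inl (hrun k h)
          · exact Or.inr h
        · rintro (h | h)
          · exact Or.inl h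
          · exact Or.inr (Or.inr h)
      have hxnot : x ∉ (xs.dropWhile (fun y => y == x)).toFinset := by
        simpa [List.mem_toFinset] using hxrest
      have hksum : kSum B (x :: xs)
          = (if ((1 + ((xs.takeWhile (fun y => y == x)).length : Int)) = B) then x else 0)
            + kSum B (xs.dropWhile (fun y => y == x)) := by
        unfold kSum
        rw [hfins, Finset.sum_insert hxnot]
        congr 1
        · rw [hcount_x]
          have hiff : ((((xs.takeWhile (fun y => y == x)).length + 1 : Nat) : Int) = B)
              ↔ ((1 + ((xs.takeWhile (fun y => y == x)).length : Int)) = B) := by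
            push_cast; omega
          simp only [hiff]
        · refine Finset.sum_congr rfl (fun k hk => ?_)
          have hkx : k ≠ x := fun h => hxnot (h ▸ hk)
          rw [hcount_ne k hkx]
      rw [ih _ hrest_len hrest_pw, hksum]
      split <;> ring

theorem portB_eq_kSum (B : Int) (C : List Int) : getSumOfKOccurences_alt B C = kSum B C := by
  unfold getSumOfKOccurences_alt
  rw [scan_sorted_aux B (PySem.List.sorted C (fun x => x) false).length _ le_rfl
      (PySem.List.sorted_pairwise C (fun x => x))]
  rw [kSum_perm B (PySem.List.sorted_perm C (fun x => x) false)]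
  ring

-- ===== VERDICT (by name: the statement is the Claim_ definition above) =====
theorem getSumOfKOccurences_spec : Claim_equal_getSumOfKOccurences := by
  intro B C _
  unfold Spec_getSumOfKOccurences
  rw [portA_eq_kSum, portB_eq_kSum]
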